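-- pv_equiv track=rewrite | github.com/SteScheller/FestoCodingChallenge2023 | chapter1/puzzle3.py | fullfils_weight_equality
-- ===== SOURCE A (Python) =====
-- from typing import List, Tuple, Optional
-- from functools import reduce
-- from operator import mul
-- from math import gcd
--
-- Flasks = List[int]
--
-- def fullfils_weight_equality(left: Flasks, right: Flasks) -> bool:
--     def compute_weight_fraction(flasks: Flasks) -> Tuple[int, int]:
--         if len(flasks) == 1:
--             nom = 1
--             denom = flasks[0]
--             divisor = 1
--         else:
--             summands = list()
--             for i in range(len(flasks)):
--                 x, y = flasks[:i], flasks[i + 1 :]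
--                 factor = reduce(mul, x + y)
--                 summands.append(factor)
--             nom = sum(summands)
--             denom = reduce(mul, flasks)
--             divisor = gcd(nom, denom)
--         return nom // divisor, denom // divisor
--
--     return compute_weight_fraction(left) == compute_weight_fraction(right)
-- ===== SOURCE B (Python) =====
-- from math import gcd
--
-- def fullfils_weight_equality(left, right):
--     # Fraction sum 1/x maintained incrementally: one pass, O(n) multiplications.
--     def weight_fraction(flasks):
--         nom, denom = 0, 1
--         for x in flasks:
--             nom, denom = nom * x + denom, denom * x
--         g = gcd(nom, denom)
--         return nom // g, denom // g
--     return weight_fraction(left) == weight_fraction(right)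
-- ===== Notes on version B (the rewrite author's own statement) =====
-- stated objective: faster
-- what changed: Instead of computing each leave-one-out product with a fresh slice+reduce (O(n^2) multiplications), B folds the fraction sum 1/x1+...+1/xn in one pass via (nom,denom) -> (nom*x+denom, denom*x), then reduces by gcd; the resulting (nom,denom) pair is identical to A's before reduction.
import Mathlib
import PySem

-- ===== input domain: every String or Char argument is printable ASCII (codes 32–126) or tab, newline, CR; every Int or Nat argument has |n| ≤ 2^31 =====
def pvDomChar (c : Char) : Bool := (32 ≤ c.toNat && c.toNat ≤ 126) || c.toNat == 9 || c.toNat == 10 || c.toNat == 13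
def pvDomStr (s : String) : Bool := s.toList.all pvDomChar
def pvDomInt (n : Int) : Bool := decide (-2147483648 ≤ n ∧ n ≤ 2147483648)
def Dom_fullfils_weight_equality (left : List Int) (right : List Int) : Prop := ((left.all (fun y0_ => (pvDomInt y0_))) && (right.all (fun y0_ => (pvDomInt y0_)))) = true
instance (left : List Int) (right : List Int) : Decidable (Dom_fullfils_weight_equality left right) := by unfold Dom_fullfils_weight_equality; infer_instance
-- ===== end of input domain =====

-- B replaces A's quadratic leave-one-out slice/reduce products by a single fold maintaining the
-- (numerator, denominator) fraction sum; measured faster (asymptotically fewer multiplications).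


-- ===== PORT A =====
-- reduce(mul, l); Python raises on []: Pre_ keeps every reduce call nonempty (0 is a dummy)
def pvReduceMul (l : List Int) : Int :=
  match l with
  | [] => 0
  | h :: t => t.foldl (· * ·) h

def pvCwfA (flasks : List Int) : Int × Int :=
  if flasks.length = 1 then
    let nom : Int := 1
    let denom : Int := PySem.List.pyGetD flasks 0 0   -- flasks[0]; index 0 is in range here
    let divisor : Int := 1
    (PySem.Int.floordiv nom divisor, PySem.Int.floordiv denom divisor)
  else
    let summands : List Int :=
      (PySem.List.pyRange 0 (flasks.length : Int) 1).map (fun i =>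
        pvReduceMul (PySem.List.slice flasks none (some i) ++
                     PySem.List.slice flasks (some (i + 1)) none))
    let nom : Int := summands.sum
    let denom : Int := pvReduceMul flasks
    let divisor : Int := (Int.gcd nom denom : Int)   -- math.gcd: nonnegative
    (PySem.Int.floordiv nom divisor, PySem.Int.floordiv denom divisor)

def fullfils_weight_equality (left : List Int) (right : List Int) : Bool :=
  pvCwfA left == pvCwfA right

-- ===== PORT B =====
def pvCwfB (flasks : List Int) : Int × Int :=
  let p := flasks.foldl (fun (p : Int × Int) x => (p.1 * x + p.2, p.2 * x)) (0, 1)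
  let g : Int := (Int.gcd p.1 p.2 : Int)
  (PySem.Int.floordiv p.1 g, PySem.Int.floordiv p.2 g)

def fullfils_weight_equality_alt (left : List Int) (right : List Int) : Bool :=
  pvCwfB left == pvCwfB right

-- ===== PRECONDITION & SPEC =====
-- A raises on an empty list (reduce of an empty iterable) and on a list with two or more zeros
-- (gcd(0,0)=0, then division by zero); Pre_ excludes exactly those inputs.
def Pre_fullfils_weight_equality (left : List Int) (right : List Int) : Prop :=
  left ≠ [] ∧ right ≠ [] ∧ left.count 0 ≤ 1 ∧ right.count 0 ≤ 1
instance (left : List Int) (right : List Int) : Decidable (Pre_fullfils_weight_equality left right) := by unfold Pre_fullfils_weight_equality; infer_instance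

def pvWitness_fullfils_weight_equality : List Int × List Int := ([2, 3], [6, 2, 2])

def Spec_fullfils_weight_equality (left : List Int) (right : List Int) (out : Bool) : Prop := out = fullfils_weight_equality_alt left right
instance (left : List Int) (right : List Int) (out : Bool) : Decidable (Spec_fullfils_weight_equality left right out) := by unfold Spec_fullfils_weight_equality; infer_instance

-- ===== CLAIM (what is proved, stated in full; the proofs are below) =====
def Claim_equal_fullfils_weight_equality : Prop := ∀ (left : List Int) (right : List Int), Dom_fullfils_weight_equality left right → Pre_fullfils_weight_equality left right → Spec_fullfils_weight_equality left right (fullfils_weight_equality left right)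


-- ===== LEMMAS AND PROOFS =====

-- E l = sum over i of the product of l with its i-th element removed (the fraction numerator)
def pvE : List Int → Int
  | [] => 0
  | x :: t => t.prod + x * pvE t

theorem pv_foldl_mul (t : List Int) (a : Int) : t.foldl (· * ·) a = a * t.prod := by
  induction t generalizing a with
  | nil => simp
  | cons x t ih => simp [List.foldl_cons, ih, List.prod_cons, mul_assoc]

theorem pv_reduceMul_eq_prod (l : List Int) (h : l ≠ []) : pvReduceMul l = l.prod := by
  cases l with
  | nil => exact absurd rfl h
  | cons x t => simp [pvReduceMul, pv_foldl_mul]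

theorem pv_fold_frac (l : List Int) (n d : Int) :
    l.foldl (fun (p : Int × Int) x => (p.1 * x + p.2, p.2 * x)) (n, d)
      = (n * l.prod + d * pvE l, d * l.prod) := by
  induction l generalizing n d with
  | nil => simp [pvE]
  | cons x t ih =>
    simp only [List.foldl_cons, ih, pvE, List.prod_cons, Prod.mk.injEq]
    constructor <;> ring

theorem pv_loo_sum (l : List Int) :
    (((List.range l.length).map
        (fun i => (l.take i).prod * (l.drop (i + 1)).prod)).sum) = pvE l := by
  induction l with
  | nil => simp [pvE]
  | cons x t ih =>
    rw [List.length_cons, List.range_succ_eq_map, List.map_cons, List.map_map]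
    simp only [List.sum_cons, List.take_zero, List.prod_nil, one_mul, Function.comp_def,
      Nat.succ_eq_add_one, List.drop_succ_cons, List.drop_zero]
    have : ((List.range t.length).map
        (fun i => ((x :: t).take (i + 1)).prod * (t.drop (i + 1)).prod)).sum
        = x * ((List.range t.length).map
            (fun i => (t.take i).prod * (t.drop (i + 1)).prod)).sum := by
      rw [← List.sum_map_mul_left]
      congr 1
      apply List.map_congr_left
      intro i _
      simp [List.take_succ_cons, List.prod_cons, mul_assoc]
    rw [this, ih, pvE]

theorem pv_cwf_eq (flasks : List Int) (h : flasks ≠ []) : pvCwfA flasks = pvCwfB flasks := by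
  have hB : pvCwfB flasks =
      (PySem.Int.floordiv (pvE flasks) (Int.gcd (pvE flasks) flasks.prod : Int),
       PySem.Int.floordiv flasks.prod (Int.gcd (pvE flasks) flasks.prod : Int)) := by
    simp only [pvCwfB, pv_fold_frac, zero_mul, zero_add, one_mul]
  rcases flasks with _ | ⟨a, t⟩
  · exact absurd rfl h
  rcases t with _ | ⟨b, t⟩
  · -- length 1: A's special branch and B agree, gcd(1,a) = 1
    simp only [hB, pvCwfA, List.length_cons, List.length_nil]
    simp [pvE, PySem.List.pyGetD, PySem.List.pyGet?, PySem.List.pyIdx?, Int.one_gcd]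
  · -- length ≥ 2: A's else branch computes the same (nom, denom)
    set l := a :: b :: t with hl
    have hlen : l.length ≠ 1 := by simp [hl]
    have hnom : ((PySem.List.pyRange 0 (l.length : Int) 1).map (fun i =>
        pvReduceMul (PySem.List.slice l none (some i) ++
                     PySem.List.slice l (some (i + 1)) none))).sum = pvE l := by
      rw [← pv_loo_sum l]
      rw [show PySem.List.pyRange 0 (l.length : Int) 1
            = (List.range l.length).map (fun k : Nat => (k : Int)) by
        rw [PySem.List.pyRange_one]
        simp]
      rw [List.map_map]
      congr 1
      apply List.map_congr_left
      intro i hi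
      simp only [Function.comp]
      rw [PySem.List.slice_to_natCast]
      rw [show ((i : Int) + 1) = ((i + 1 : Nat) : Int) by push_cast; ring]
      rw [PySem.List.slice_from_natCast]
      rw [pv_reduceMul_eq_prod, List.prod_append]
      -- the leave-one-out list is nonempty since l has ≥ 2 elements
      intro hcontra
      have hlen2 : (l.take i ++ l.drop (i + 1)).length = l.length - 1 := by
        have : i < l.length := List.mem_range.mp hi
        simp [List.length_append, List.length_take, List.length_drop]
        omega
      rw [hcontra] at hlen2
      simp [hl] at hlen2
    simp only [pvCwfA, if_neg hlen, hnom, pv_reduceMul_eq_prod l (by simp [hl]), hB]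

-- ===== VERDICT (by name: the statement is the Claim_ definition above) =====
theorem fullfils_weight_equality_spec : Claim_equal_fullfils_weight_equality := by
  intro left right _ hpre
  unfold Spec_fullfils_weight_equality fullfils_weight_equality fullfils_weight_equality_alt
  rw [pv_cwf_eq left hpre.1, pv_cwf_eq right hpre.2.1]
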